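-- pv_equiv track=rewrite | github.com/harsh9500/Google-FooBar-Challenge | Level 4/Free the Bunny Prisoners.py | solution
-- ===== SOURCE A (Python) =====
-- from itertools import combinations
--
-- def solution(num_buns, num_required):
--     # Your code here
--     answer=[[] for i in range(num_buns)]
--     if num_required==0:
--         return answer
--     key=0
--     combinationSize=num_buns-num_required+1
--     for comb in combinations(answer,combinationSize):
--         for tempComb in comb:
--             tempComb.append(key)
--         key+=1
--     return answer
-- ===== SOURCE B (Python) =====
-- from itertools import combinations
--
-- def solution(num_buns, num_required):
--     size = max(num_buns - num_required + 1, 0)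
--     keyed = list(enumerate(combinations(range(num_buns), size)))
--     return [[key for key, comb in keyed if i in comb] for i in range(num_buns)]
-- ===== Notes on version B (the rewrite author's own statement) =====
-- stated objective: alternative
-- what changed: Transposes the loop nesting: instead of mutating shared sublists while iterating the combinations, B builds each bunny's key list with one comprehension per bunny, testing membership of the bunny index in each enumerated combination; the num_required==0 special case disappears and max(size,0) replaces the ValueError on negative combination size.
import Mathlib
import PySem

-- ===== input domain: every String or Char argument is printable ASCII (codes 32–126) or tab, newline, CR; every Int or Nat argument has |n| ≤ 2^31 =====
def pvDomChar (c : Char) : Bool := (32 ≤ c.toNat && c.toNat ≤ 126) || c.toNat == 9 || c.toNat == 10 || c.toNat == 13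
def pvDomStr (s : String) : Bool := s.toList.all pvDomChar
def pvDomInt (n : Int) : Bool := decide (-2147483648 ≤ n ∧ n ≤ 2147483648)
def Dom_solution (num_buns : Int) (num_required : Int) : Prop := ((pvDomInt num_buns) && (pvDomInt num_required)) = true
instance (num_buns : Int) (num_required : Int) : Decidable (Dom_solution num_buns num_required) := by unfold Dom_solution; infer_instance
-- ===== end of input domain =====

-- B transposes the loops: one comprehension per bunny over the enumerated combinations
-- (a membership test instead of mutating shared sublists), needing no num_required==0 special case; objective: alternative.

-- shared library helper: itertools.combinations(l, k) in lexicographic order (both Pythons call it)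
def pvCombos : List Int → Nat → List (List Int)
  | _, 0 => [[]]
  | [], _+1 => []
  | x :: xs, k+1 =>
    if xs.length + 1 < k + 1 then []  -- itertools' upfront 'if r > n: return'
    else ((pvCombos xs k).map (x :: ·)) ++ pvCombos xs (k+1)

-- ===== PORT A =====
-- A builds num_buns empty sublists and mutates the sublists chosen by each combination;
-- ported by position: combinations over range(num_buns) positions, append = List.modify.
def solution (num_buns : Int) (num_required : Int) : List (List Int) :=
  let answer : List (List Int) := (PySem.List.pyRange 0 num_buns 1).map (fun _ => [])
  if num_required == 0 then answer
  else
    let combinationSize : Int := num_buns - num_required + 1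
    -- Pre_ excludes combinationSize < 0 (Python raises ValueError there), so .toNat is exact
    (PySem.List.enumerate (pvCombos (PySem.List.pyRange 0 num_buns 1) combinationSize.toNat) 0).foldl
      (fun ans kc => kc.2.foldl (fun a p => a.modify p.toNat (· ++ [kc.1])) ans) answer

-- ===== PORT B =====
def solution_alt (num_buns : Int) (num_required : Int) : List (List Int) :=
  let size : Int := max (num_buns - num_required + 1) 0
  let keyed := PySem.List.enumerate (pvCombos (PySem.List.pyRange 0 num_buns 1) size.toNat) 0
  (PySem.List.pyRange 0 num_buns 1).map
    (fun i => keyed.filterMap (fun kc => if i ∈ kc.2 then some kc.1 else none))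

-- ===== PRECONDITION & SPEC =====
-- Pre_ excludes exactly the inputs where A raises ValueError from combinations
-- (negative combination size: num_required ≠ 0 and num_buns - num_required + 1 < 0).
def Pre_solution (num_buns : Int) (num_required : Int) : Prop :=
  num_required = 0 ∨ 0 ≤ num_buns - num_required + 1
instance (num_buns : Int) (num_required : Int) : Decidable (Pre_solution num_buns num_required) := by
  unfold Pre_solution; infer_instance

def pvWitness_solution : Int × Int := (3, 2)

def Spec_solution (num_buns : Int) (num_required : Int) (out : List (List Int)) : Prop :=
  out = solution_alt num_buns num_required
instance (num_buns : Int) (num_required : Int) (out : List (List Int)) : Decidable (Spec_solution num_buns num_required out) := by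
  unfold Spec_solution; infer_instance

-- ===== CLAIM (what is proved, stated in full; the proofs are below) =====
def Claim_equal_solution : Prop := ∀ (num_buns : Int) (num_required : Int), Dom_solution num_buns num_required → Pre_solution num_buns num_required → Spec_solution num_buns num_required (solution num_buns num_required)

-- ===== LEMMAS AND PROOFS =====

-- every combination is a sublist of the source list
lemma pvCombos_sublist {l : List Int} {k : Nat} {c : List Int} (hc : c ∈ pvCombos l k) :
    c.Sublist l := by
  induction l generalizing k c with
  | nil =>
    cases k with
    | zero => simp [pvCombos] at hc; simp [hc]
    | succ k => simp [pvCombos] at hc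
  | cons x xs ih =>
    cases k with
    | zero => simp [pvCombos] at hc; simp [hc]
    | succ k =>
      simp only [pvCombos] at hc
      split at hc
      · simp at hc
      · simp only [List.mem_append, List.mem_map] at hc
        rcases hc with ⟨c', hc', rfl⟩ | hc
        · exact (ih hc').cons₂ x
        · exact (ih hc).cons x

-- combinations of size larger than the list are empty
lemma pvCombos_eq_nil {l : List Int} {k : Nat} (h : l.length < k) : pvCombos l k = [] := by
  induction l generalizing k with
  | nil => cases k with
    | zero => omega
    | succ k => rfl
  | cons x xs ih =>
    cases k with
    | zero => omega
    | succ k =>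
      simp only [pvCombos]
      rw [if_pos (by simp at h; omega)]

-- the inner append-loop of A, element by element
lemma get?_fold_modify (c : List Int) (hnd : c.Nodup) (hpos : ∀ p ∈ c, 0 ≤ p)
    (ans : List (List Int)) (key : Int) (j : Nat) :
    (c.foldl (fun a p => a.modify p.toNat (· ++ [key])) ans)[j]? =
      if (j : Int) ∈ c then ans[j]?.map (· ++ [key]) else ans[j]? := by
  induction c generalizing ans with
  | nil => simp
  | cons p rest ih =>
    have hp0 : 0 ≤ p := hpos p (by simp)
    have hrest : ∀ q ∈ rest, 0 ≤ q := fun q hq => hpos q (by simp [hq])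
    simp only [List.foldl_cons]
    rw [ih hnd.of_cons hrest]
    by_cases hpj : p = (j : Int)
    · have hjr : (j : Int) ∉ rest := by
        subst hpj; exact (List.nodup_cons.mp hnd).1
      have : p.toNat = j := by omega
      simp [hpj, hjr]
    · have hne : p.toNat ≠ j := by omega
      have hjp : ¬ ((j : Int) = p) := fun h => hpj h.symm
      by_cases hjr : (j : Int) ∈ rest <;>
        simp [hjp, hjr, hne]

-- the whole enumerated loop of A, element by element: index j collects exactly the
-- keys of the combinations containing j, in order
lemma get?_loop (cs : List (List Int)) (s : Int) (ans : List (List Int)) (j : Nat)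
    (hcs : ∀ c ∈ cs, c.Nodup ∧ ∀ p ∈ c, 0 ≤ p) :
    ((PySem.List.enumerate cs s).foldl
        (fun ans kc => kc.2.foldl (fun a p => a.modify p.toNat (· ++ [kc.1])) ans) ans)[j]? =
      ans[j]?.map
        (· ++ (PySem.List.enumerate cs s).filterMap
            (fun kc => if (j : Int) ∈ kc.2 then some kc.1 else none)) := by
  induction cs generalizing s ans with
  | nil => simp [PySem.List.enumerate_nil]
  | cons c rest ih =>
    have hc := hcs c (by simp)
    rw [PySem.List.enumerate_cons]
    simp only [List.foldl_cons, List.filterMap_cons]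
    rw [ih (s + 1) _ (fun c hc' => hcs c (by simp [hc']))]
    rw [get?_fold_modify c hc.1 hc.2]
    by_cases hj : (j : Int) ∈ c
    · simp [hj, Option.map_map]
      cases ans[j]? <;> simp [Function.comp]
    · simp [hj]

-- ===== VERDICT (by name: the statement is the Claim_ definition above) =====
theorem solution_spec : Claim_equal_solution := by
  intro nb nr _hdom hpre
  unfold Spec_solution solution solution_alt
  dsimp only
  by_cases h0 : nr = 0
  · subst h0
    simp only [BEq.rfl, if_true]
    by_cases hn : 0 < nb
    · have hmax : max (nb - 0 + 1) 0 = nb + 1 := by omega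
      have hnil : pvCombos (PySem.List.pyRange 0 nb 1) ((nb + 1).toNat) = [] :=
        pvCombos_eq_nil (by rw [PySem.List.length_pyRange_one]; omega)
      rw [hmax, hnil]
      simp [PySem.List.enumerate_nil, PySem.List.length_pyRange_one]
    · have hL : PySem.List.pyRange 0 nb 1 = [] := PySem.List.pyRange_one_eq_nil (by omega)
      simp [hL]
  · have hk : 0 ≤ nb - nr + 1 := hpre.resolve_left h0
    have hmax : max (nb - nr + 1) 0 = nb - nr + 1 := by omega
    have hne : (nr == 0) = false := by simp [h0]
    simp only [hne, Bool.false_eq_true, if_false, hmax]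
    apply List.ext_getElem?
    intro j
    have hcs : ∀ c ∈ pvCombos (PySem.List.pyRange 0 nb 1) (nb - nr + 1).toNat,
        c.Nodup ∧ ∀ p ∈ c, 0 ≤ p := by
      intro c hc
      have hsub := pvCombos_sublist hc
      refine ⟨hsub.nodup (PySem.List.nodup_pyRange_one 0 nb), fun p hp => ?_⟩
      have := PySem.List.mem_pyRange_one.mp (hsub.subset hp)
      omega
    rw [get?_loop _ 0 _ j hcs]
    rw [List.getElem?_map, List.getElem?_map, PySem.List.getElem?_pyRange_one]
    rcases Nat.lt_or_ge j (nb - 0).toNat with hj | hj <;> simp
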